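-- pv_equiv track=rewrite | github.com/gptme/agent-workspace-plugin | hooks/validate_task.py | validate_task_frontmatter
-- ===== SOURCE A (Python) =====
-- VALID_STATES = {"backlog", "todo", "active", "waiting", "done", "cancelled", "someday"}
--
-- def validate_task_frontmatter(content: str) -> str | None:
--     """Check that task content has valid frontmatter. Returns error message or None."""
--     lines = content.split("\n")
--
--     # Must start with frontmatter delimiter
--     if not lines or lines[0].strip() != "---":
--         return "Task file missing YAML frontmatter (must start with ---)"
--
--     # Find closing delimiter
--     end = -1
--     for i, line in enumerate(lines[1:], 1):
--         if line.strip() == "---":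
--             end = i
--             break
--
--     if end == -1:
--         return "Task file has unclosed YAML frontmatter (missing closing ---)"
--
--     frontmatter = "\n".join(lines[1:end])
--
--     # Check for required 'state' field
--     state_value = None
--     has_created = False
--     for line in frontmatter.split("\n"):
--         stripped = line.strip()
--         if stripped.startswith("state:"):
--             state_value = stripped.split(":", 1)[1].strip()
--         if stripped.startswith("created:"):
--             has_created = True
--
--     if state_value is None:
--         return "Task file missing required 'state' field in frontmatter"
--
--     if not has_created:
--         return "Task file missing required 'created' field in frontmatter"
--
--     if state_value not in VALID_STATES:
--         return (
--             f"Invalid task state '{state_value}'. "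
--             f"Valid states: {', '.join(sorted(VALID_STATES))}"
--         )
--
--     return None
-- ===== SOURCE B (Python) =====
-- VALID_STATES = {"backlog", "todo", "active", "waiting", "done", "cancelled", "someday"}
--
-- def validate_task_frontmatter(content: str) -> str | None:
--     """Check that task content has valid frontmatter. Returns error message or None."""
--     lines = content.split("\n")
--
--     if lines[0].strip() != "---":
--         return "Task file missing YAML frontmatter (must start with ---)"
--
--     # Single pass over the block: build a key -> value map (last value wins),
--     # breaking at the closing delimiter; the for-else detects an unclosed block.
--     fields = {}
--     for line in lines[1:]:
--         stripped = line.strip()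
--         if stripped == "---":
--             break
--         if ":" in stripped:
--             key, _, value = stripped.partition(":")
--             fields[key] = value.strip()
--     else:
--         return "Task file has unclosed YAML frontmatter (missing closing ---)"
--
--     if "state" not in fields:
--         return "Task file missing required 'state' field in frontmatter"
--
--     if "created" not in fields:
--         return "Task file missing required 'created' field in frontmatter"
--
--     if fields["state"] not in VALID_STATES:
--         return (
--             f"Invalid task state '{fields['state']}'. "
--             f"Valid states: {', '.join(sorted(VALID_STATES))}"
--         )
--
--     return None
-- ===== Notes on version B (the rewrite author's own statement) =====
-- stated objective: alternative
-- what changed: A finds the closing ---, re-joins and re-splits the block, then flag-scans it for state/created; B makes a single pass over the lines that stops at the closing --- while building a key->value dict (split on the first colon, last value wins) and validates by dict lookups.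
import Mathlib
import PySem

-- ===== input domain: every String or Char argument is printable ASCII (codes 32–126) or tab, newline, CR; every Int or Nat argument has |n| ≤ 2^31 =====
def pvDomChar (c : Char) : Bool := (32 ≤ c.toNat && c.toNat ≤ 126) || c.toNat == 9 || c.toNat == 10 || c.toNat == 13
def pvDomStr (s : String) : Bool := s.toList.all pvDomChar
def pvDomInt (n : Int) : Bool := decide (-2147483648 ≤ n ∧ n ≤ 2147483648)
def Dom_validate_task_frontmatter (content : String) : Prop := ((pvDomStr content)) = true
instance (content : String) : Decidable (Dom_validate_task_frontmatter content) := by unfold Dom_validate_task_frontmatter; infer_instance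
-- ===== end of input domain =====

-- B replaces A's two-pass frontmatter handling (find the closing ---, re-join and
-- re-split the block, then flag-scan for state/created) by a single pass that stops at
-- the closing --- while building a key→value dict, validated by dict lookups.

-- shared module-level constant VALID_STATES and the fixed message strings
def pvValidStates : PySem.Set (List Char) :=
  PySem.Set.ofList ["backlog".toList, "todo".toList, "active".toList, "waiting".toList,
                    "done".toList, "cancelled".toList, "someday".toList]
def pvStatesJoined : List Char :=
  PySem.Chars.join (", ".toList) (PySem.List.sorted pvValidStates (fun x => x) false)
def pvMsgNoFM : String := "Task file missing YAML frontmatter (must start with ---)"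
def pvMsgUnclosed : String := "Task file has unclosed YAML frontmatter (missing closing ---)"
def pvMsgNoState : String := "Task file missing required 'state' field in frontmatter"
def pvMsgNoCreated : String := "Task file missing required 'created' field in frontmatter"
def pvMsgInvalid (sv : List Char) : String :=
  String.ofList ("Invalid task state '".toList ++ sv ++ "'. Valid states: ".toList ++ pvStatesJoined)

-- ===== PORT A =====
-- the 'for i, line in enumerate(lines[1:], 1): if line.strip() == "---": end = i; break' loop
def pvFindEnd : List (List Char) → Nat → Option Nat
  | [], _ => none
  | l :: rest, i =>
    if PySem.Chars.strip l = "---".toList then some i else pvFindEnd rest (i + 1)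

-- one iteration of A's scan loop over the re-split frontmatter (state : (state_value, has_created))
def pvScanStep (st : Option (List Char) × Bool) (line : List Char) : Option (List Char) × Bool :=
  let s := PySem.Chars.strip line
  let sv := if PySem.Chars.startswith s ("state:".toList) then
      -- stripped.split(":", 1)[1] : index 1 exists because the guard guarantees a ':'
      some (PySem.Chars.strip ((PySem.List.pyGet? (PySem.Chars.splitOnMax s [':'] 1) 1).getD []))
    else st.1
  let hc := if PySem.Chars.startswith s ("created:".toList) then true else st.2
  (sv, hc)

def validate_task_frontmatter (content : String) : Option String :=
  let lines := PySem.Chars.splitOn content.toList ['\n']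
  match lines with
  | [] => some pvMsgNoFM            -- 'if not lines' (unreachable: split never returns [])
  | l0 :: rest =>
    if PySem.Chars.strip l0 ≠ "---".toList then some pvMsgNoFM
    else
      match pvFindEnd rest 1 with
      | none => some pvMsgUnclosed
      | some e =>
        let fm := PySem.Chars.join ['\n'] (PySem.List.slice (l0 :: rest) (some 1) (some (e : Int)))
        let st := (PySem.Chars.splitOn fm ['\n']).foldl pvScanStep (none, false)
        match st.1 with
        | none => some pvMsgNoState
        | some v =>
          if ¬ st.2 then some pvMsgNoCreated
          else if ¬ PySem.Set.contains pvValidStates v then some (pvMsgInvalid v)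
          else none

-- ===== PORT B =====
-- s.partition(":") (before, after) — hand port, exact when ':' occurs in s (B only calls it then)
def pvPartitionColon : List Char → List Char × List Char
  | [] => ([], [])
  | c :: r =>
    if c = ':' then ([], r)
    else
      let p := pvPartitionColon r
      (c :: p.1, p.2)

-- B's single loop: break at the closing '---' (some dict), for-else → none (unclosed)
def pvParse : List (List Char) → PySem.Dict (List Char) (List Char) →
    Option (PySem.Dict (List Char) (List Char))
  | [], _ => none
  | l :: rest, d =>
    let s := PySem.Chars.strip l
    if s = "---".toList then some d
    else if PySem.Chars.isIn [':'] s then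
      let p := pvPartitionColon s
      pvParse rest (d.insert p.1 (PySem.Chars.strip p.2))
    else pvParse rest d

def validate_task_frontmatter_alt (content : String) : Option String :=
  let lines := PySem.Chars.splitOn content.toList ['\n']
  match lines with
  | [] => some pvMsgNoFM            -- unreachable: split never returns []
  | l0 :: rest =>
    if PySem.Chars.strip l0 ≠ "---".toList then some pvMsgNoFM
    else
      match pvParse rest PySem.Dict.empty with
      | none => some pvMsgUnclosed
      | some d =>
        if ¬ d.contains ("state".toList) then some pvMsgNoState
        else if ¬ d.contains ("created".toList) then some pvMsgNoCreated
        else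
          let v := (d.get? ("state".toList)).getD []
          if ¬ PySem.Set.contains pvValidStates v then some (pvMsgInvalid v)
          else none

-- ===== PRECONDITION & SPEC =====
def Spec_validate_task_frontmatter (content : String) (out : Option String) : Prop := out = validate_task_frontmatter_alt content
instance (content : String) (out : Option String) : Decidable (Spec_validate_task_frontmatter content out) := by unfold Spec_validate_task_frontmatter; infer_instance

-- ===== CLAIM (what is proved, stated in full; the proofs are below) =====
def Claim_equal_validate_task_frontmatter : Prop := ∀ (content : String), Dom_validate_task_frontmatter content → Spec_validate_task_frontmatter content (validate_task_frontmatter content)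

-- ===== LEMMAS AND PROOFS =====

-- structural model of splitting on '\n'
def pvMySplit (cur : List Char) : List Char → List (List Char)
  | [] => [cur]
  | c :: r => if c = '\n' then cur :: pvMySplit [] r else pvMySplit (cur ++ [c]) r

-- the dict built by B's loop over lines with no closing '---'
def pvFoldD (ls : List (List Char)) (d : PySem.Dict (List Char) (List Char)) :
    PySem.Dict (List Char) (List Char) :=
  ls.foldl (fun d l =>
    let s := PySem.Chars.strip l
    if PySem.Chars.isIn [':'] s then
      d.insert (pvPartitionColon s).1 (PySem.Chars.strip (pvPartitionColon s).2)
    else d) d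

theorem pv_go_eq (fuel : Nat) : ∀ (l cur : List Char) (accs : List (List Char)),
    l.length < fuel →
    PySem.Chars.splitOn.go ['\n'] fuel l cur accs = accs.reverse ++ pvMySplit cur.reverse l := by
  induction fuel with
  | zero => intro l cur accs h; omega
  | succ f ih =>
    intro l cur accs h
    cases l with
    | nil => simp [PySem.Chars.splitOn.go, pvMySplit]
    | cons c r =>
      rw [PySem.Chars.splitOn.go]
      by_cases hc : c = '\n'
      · subst hc
        simp only [List.isPrefixOf, List.length_cons] at *
        rw [if_pos (by simp)]
        have hd : List.drop (([] : List Char).length + 1) ('\n' :: r) = r := by simp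
        rw [hd, ih r [] _ (by simpa using Nat.lt_of_succ_lt_succ h)]
        simp [pvMySplit]
      · rw [if_neg (by simp [List.isPrefixOf]; intro h'; exact hc h'.symm)]
        rw [ih r (c :: cur) accs (by simpa using Nat.lt_of_succ_lt_succ h)]
        simp [pvMySplit, hc]

theorem pv_splitOn_eq (s : List Char) : PySem.Chars.splitOn s ['\n'] = pvMySplit [] s := by
  rw [PySem.Chars.splitOn, pv_go_eq (s.length + 1) s [] [] (by omega)]
  simp

theorem pv_mySplit_no_nl : ∀ (l cur : List Char), '\n' ∉ cur →
    ∀ p ∈ pvMySplit cur l, '\n' ∉ p := by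
  intro l
  induction l with
  | nil => intro cur h p hp; simp [pvMySplit] at hp; subst hp; exact h
  | cons c r ih =>
    intro cur h p hp
    by_cases hc : c = '\n'
    · subst hc; simp [pvMySplit] at hp
      rcases hp with hp | hp
      · subst hp; exact h
      · exact ih [] (by simp) p hp
    · simp [pvMySplit, hc] at hp
      exact ih (cur ++ [c]) (by simp [h]; exact fun h' => hc h'.symm) p hp

theorem pv_mySplit_append : ∀ (a l cur : List Char), '\n' ∉ a →
    pvMySplit cur (a ++ l) = pvMySplit (cur ++ a) l := by
  intro a
  induction a with
  | nil => intro l cur _; simp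
  | cons c r ih =>
    intro l cur h
    simp at h
    have hc : c ≠ '\n' := fun h' => h.1 h'.symm
    simp [pvMySplit, hc]
    rw [ih l (cur ++ [c]) h.2]
    simp

theorem pv_mySplit_join : ∀ (ls : List (List Char)), ls ≠ [] → (∀ p ∈ ls, '\n' ∉ p) →
    pvMySplit [] (PySem.Chars.join ['\n'] ls) = ls := by
  intro ls
  induction ls with
  | nil => intro h; exact absurd rfl h
  | cons p ps ih =>
    intro _ h
    cases ps with
    | nil =>
      rw [PySem.Chars.join_singleton]
      have := pv_mySplit_append p [] [] (h p (by simp))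
      simpa [pvMySplit] using this
    | cons q qs =>
      rw [PySem.Chars.join_cons_cons]
      rw [List.append_assoc, pv_mySplit_append p _ [] (h p (by simp))]
      simp only [List.nil_append]
      rw [show (['\n'] ++ PySem.Chars.join ['\n'] (q :: qs) : List Char) = '\n' :: PySem.Chars.join ['\n'] (q :: qs) from rfl]
      simp only [pvMySplit]
      rw [ih (by simp) (fun x hx => h x (by simp [hx]))]
      simp

theorem pv_partition_decomp (k r : List Char) (hk : ':' ∉ k) :
    pvPartitionColon (k ++ ':' :: r) = (k, r) := by
  induction k with
  | nil => simp [pvPartitionColon]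
  | cons c t ih =>
    simp at hk
    have hc : c ≠ ':' := fun h' => hk.1 h'.symm
    simp [pvPartitionColon, hc, ih hk.2]

theorem pv_colon_decomp (s : List Char) (h : ':' ∈ s) :
    ∃ k r, ':' ∉ k ∧ s = k ++ ':' :: r := by
  induction s with
  | nil => simp at h
  | cons c t ih =>
    by_cases hc : c = ':'
    · exact ⟨[], t, by simp, by simp [hc]⟩
    · have : ':' ∈ t := by simp at h; rcases h with h | h; exact absurd h.symm hc; exact h
      obtain ⟨k, r, hk, he⟩ := ih this
      exact ⟨c :: k, r, by simp [hk]; exact fun h' => hc h'.symm, by simp [he]⟩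

theorem pv_startswith_iff (k k' r : List Char) (hk : ':' ∉ k) (hk' : ':' ∉ k') :
    PySem.Chars.startswith (k ++ ':' :: r) (k' ++ [':']) = true ↔ k = k' := by
  rw [PySem.Chars.startswith_iff]
  constructor
  · rintro ⟨t, ht⟩
    have h1 := pv_partition_decomp k r hk
    have h2 : pvPartitionColon (k' ++ ':' :: t) = (k', t) := pv_partition_decomp k' t hk'
    rw [show (k' ++ [':']) ++ t = k' ++ ':' :: t by simp] at ht
    rw [← ht] at h1
    rw [h2] at h1
    exact (Prod.mk.injEq _ _ _ _ ▸ h1).1.symm ▸ rfl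
  · rintro rfl
    exact ⟨r, by simp⟩

theorem pv_startswith_no_colon (s p : List Char) (hs : ':' ∉ s) (hp : ':' ∈ p) :
    PySem.Chars.startswith s p = false := by
  by_contra h
  rw [Bool.not_eq_false, PySem.Chars.startswith_iff] at h
  exact hs (h.subset hp)

theorem pv_goMax0 (fuel : Nat) (l cur : List Char) (accs : List (List Char)) (h : 0 < fuel) :
    PySem.Chars.splitOnMax.go [':'] fuel 0 l cur accs = accs.reverse ++ [cur.reverse ++ l] := by
  cases fuel with
  | zero => omega
  | succ f =>
    cases l with
    | nil => simp [PySem.Chars.splitOnMax.go]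
    | cons c r => simp [PySem.Chars.splitOnMax.go]

theorem pv_goMax1 (fuel : Nat) : ∀ (k r cur : List Char) (accs : List (List Char)), ':' ∉ k →
    (k ++ ':' :: r).length < fuel →
    PySem.Chars.splitOnMax.go [':'] fuel 1 (k ++ ':' :: r) cur accs =
      accs.reverse ++ [cur.reverse ++ k, r] := by
  induction fuel with
  | zero => intro k r cur accs _ h; omega
  | succ f ih =>
    intro k r cur accs hk h
    cases k with
    | nil =>
      rw [show (([] : List Char) ++ ':' :: r) = ':' :: r from rfl]
      rw [PySem.Chars.splitOnMax.go]
      rw [if_neg (by omega), if_pos (by simp [List.isPrefixOf])]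
      have hd : List.drop ([':'] : List Char).length (':' :: r) = r := by simp
      rw [hd, pv_goMax0 f r [] _ (by simp at h; omega)]
      simp
    | cons c t =>
      simp at hk
      have hc : c ≠ ':' := fun h' => hk.1 h'.symm
      rw [show ((c :: t) ++ ':' :: r) = c :: (t ++ ':' :: r) from rfl]
      rw [PySem.Chars.splitOnMax.go]
      rw [if_neg (by omega), if_neg (by simp [List.isPrefixOf]; intro h'; exact hc h'.symm)]
      rw [ih t r (c :: cur) accs hk.2 (by simp at h ⊢; omega)]
      simp

theorem pv_splitOnMax1 (k r : List Char) (hk : ':' ∉ k) :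
    PySem.Chars.splitOnMax (k ++ ':' :: r) [':'] 1 = [k, r] := by
  rw [PySem.Chars.splitOnMax, if_neg (by omega)]
  rw [show ((1 : Int)).toNat = 1 from rfl]
  rw [pv_goMax1 _ k r [] [] hk (by omega)]
  simp

theorem pv_isIn_colon (s : List Char) : PySem.Chars.isIn [':'] s = true ↔ ':' ∈ s := by
  rw [PySem.Chars.isIn_iff_infix]
  exact List.singleton_infix_iff ':' s

theorem pv_findEnd_none : ∀ (ls : List (List Char)) (i : Nat),
    (∀ l ∈ ls, PySem.Chars.strip l ≠ "---".toList) → pvFindEnd ls i = none := by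
  intro ls
  induction ls with
  | nil => intro i _; rfl
  | cons l rest ih =>
    intro i h
    simp only [pvFindEnd]
    rw [if_neg (h l (by simp))]
    exact ih (i + 1) (fun x hx => h x (by simp [hx]))

theorem pv_findEnd_some : ∀ (pre : List (List Char)) (m : List Char) (suf : List (List Char)) (i : Nat),
    (∀ l ∈ pre, PySem.Chars.strip l ≠ "---".toList) → PySem.Chars.strip m = "---".toList →
    pvFindEnd (pre ++ m :: suf) i = some (i + pre.length) := by
  intro pre
  induction pre with
  | nil => intro m suf i _ hm; simp [pvFindEnd, hm]
  | cons l t ih =>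
    intro m suf i h hm
    simp only [List.cons_append, pvFindEnd, if_neg (h l (by simp))]
    rw [ih m suf (i + 1) (fun x hx => h x (by simp [hx])) hm]
    simp; omega

theorem pv_parse_none : ∀ (ls : List (List Char)) (d : PySem.Dict (List Char) (List Char)),
    (∀ l ∈ ls, PySem.Chars.strip l ≠ "---".toList) → pvParse ls d = none := by
  intro ls
  induction ls with
  | nil => intro d _; rfl
  | cons l rest ih =>
    intro d h
    simp only [pvParse, if_neg (h l (by simp))]
    split
    · exact ih _ (fun x hx => h x (by simp [hx]))
    · exact ih _ (fun x hx => h x (by simp [hx]))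

theorem pv_parse_some : ∀ (pre : List (List Char)) (m : List Char) (suf : List (List Char))
    (d : PySem.Dict (List Char) (List Char)),
    (∀ l ∈ pre, PySem.Chars.strip l ≠ "---".toList) → PySem.Chars.strip m = "---".toList →
    pvParse (pre ++ m :: suf) d = some (pvFoldD pre d) := by
  intro pre
  induction pre with
  | nil => intro m suf d _ hm; simp [pvParse, pvFoldD, hm]
  | cons l t ih =>
    intro m suf d h hm
    simp only [List.cons_append, pvParse, if_neg (h l (by simp)), pvFoldD, List.foldl_cons]
    split
    · exact ih m suf _ (fun x hx => h x (by simp [hx])) hm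
    · exact ih m suf _ (fun x hx => h x (by simp [hx])) hm

theorem pv_splitAtStop : ∀ (ls : List (List Char)),
    (∀ l ∈ ls, PySem.Chars.strip l ≠ "---".toList) ∨
    ∃ pre m suf, ls = pre ++ m :: suf ∧ (∀ l ∈ pre, PySem.Chars.strip l ≠ "---".toList) ∧
      PySem.Chars.strip m = "---".toList := by
  intro ls
  induction ls with
  | nil => left; simp
  | cons l rest ih =>
    by_cases hl : PySem.Chars.strip l = "---".toList
    · right; exact ⟨[], l, rest, by simp, by simp, hl⟩
    · rcases ih with h | ⟨pre, m, suf, he, hp, hm⟩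
      · left; intro x hx
        rcases List.mem_cons.mp hx with rfl | hx
        · exact hl
        · exact h x hx
      · right
        refine ⟨l :: pre, m, suf, by simp [he], ?_, hm⟩
        intro x hx
        rcases List.mem_cons.mp hx with rfl | hx
        · exact hl
        · exact hp x hx

theorem pv_inv : ∀ (ls : List (List Char)) (d : PySem.Dict (List Char) (List Char)),
    ls.foldl pvScanStep (d.get? ("state".toList), d.contains ("created".toList)) =
      ((pvFoldD ls d).get? ("state".toList), (pvFoldD ls d).contains ("created".toList)) := by
  intro ls
  induction ls with
  | nil => intro d; simp [pvFoldD]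
  | cons l rest ih =>
    intro d
    rw [List.foldl_cons]
    by_cases hcol : ':' ∈ PySem.Chars.strip l
    · obtain ⟨k, r, hk, he⟩ := pv_colon_decomp _ hcol
      have hstep : pvScanStep (d.get? ("state".toList), d.contains ("created".toList)) l =
          ((d.insert k (PySem.Chars.strip r)).get? ("state".toList),
           (d.insert k (PySem.Chars.strip r)).contains ("created".toList)) := by
        simp only [pvScanStep, he]
        have hst : ':' ∉ "state".toList := by decide
        have hcr : ':' ∉ "created".toList := by decide
        have hpg : ∀ (a b : List Char), PySem.List.pyGet? [a, b] (1 : Int) = some b :=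
          fun a b => rfl
        rw [show ("state:".toList : List Char) = "state".toList ++ [':'] from rfl]
        rw [show ("created:".toList : List Char) = "created".toList ++ [':'] from rfl]
        rw [PySem.Dict.get?_insert, PySem.Dict.contains_insert]
        by_cases h1 : k = "state".toList
        · subst h1
          rw [if_pos ((pv_startswith_iff _ _ r hk hst).mpr rfl)]
          rw [pv_splitOnMax1 _ r hk, hpg]
          rw [if_neg (by rw [pv_startswith_iff _ _ r hk hcr]; decide)]
          rw [if_pos rfl]
          simp
        · rw [if_neg (by rw [pv_startswith_iff k _ r hk hst]; exact h1)]
          by_cases h3 : k = "created".toList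
          · subst h3
            rw [if_pos ((pv_startswith_iff _ _ r hk hcr).mpr rfl)]
            rw [if_neg (by decide : ¬ ("state".toList : List Char) = "created".toList)]
            simp
          · rw [if_neg (by rw [pv_startswith_iff k _ r hk hcr]; exact h3)]
            rw [if_neg (fun h' => h1 h'.symm)]
            have hb : (("created".toList : List Char) == k) = false := by
              simp; exact fun h' => h3 h'.symm
            rw [hb]
            simp
      rw [hstep]
      have hfold : pvFoldD (l :: rest) d = pvFoldD rest (d.insert k (PySem.Chars.strip r)) := by
        simp only [pvFoldD, List.foldl_cons]
        rw [if_pos ((pv_isIn_colon _).mpr hcol)]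
        rw [he, pv_partition_decomp k r hk]
      rw [hfold]
      exact ih (d.insert k (PySem.Chars.strip r))
    · have hstep : pvScanStep (d.get? ("state".toList), d.contains ("created".toList)) l =
          (d.get? ("state".toList), d.contains ("created".toList)) := by
        simp only [pvScanStep]
        rw [pv_startswith_no_colon _ _ hcol (by decide)]
        rw [pv_startswith_no_colon _ _ hcol (by decide)]
        simp
      rw [hstep]
      have hfold : pvFoldD (l :: rest) d = pvFoldD rest d := by
        simp only [pvFoldD, List.foldl_cons]
        rw [if_neg (by rw [pv_isIn_colon]; exact hcol)]
      rw [hfold]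
      exact ih d

-- ===== VERDICT (by name: the statement is the Claim_ definition above) =====
theorem validate_task_frontmatter_spec : Claim_equal_validate_task_frontmatter := by
  intro content _
  unfold Spec_validate_task_frontmatter
  unfold validate_task_frontmatter validate_task_frontmatter_alt
  cases hl : PySem.Chars.splitOn content.toList ['\n'] with
  | nil => rfl
  | cons l0 rest =>
    by_cases h0 : PySem.Chars.strip l0 = "---".toList
    · simp only [h0, ne_eq, not_true_eq_false, if_false]
      rcases pv_splitAtStop rest with hclean | ⟨pre, m, suf, he, hp, hm⟩
      · rw [pv_findEnd_none rest 1 hclean, pv_parse_none rest _ hclean]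
      · subst he
        rw [pv_findEnd_some pre m suf 1 hp hm, pv_parse_some pre m suf _ hp hm]
        dsimp only
        have hslice' : PySem.List.slice (l0 :: (pre ++ m :: suf)) (some 1)
              (some (((1 + pre.length : Nat) : Int))) = pre := by
          rw [show (1 : Int) = ((1 : Nat) : Int) from rfl]
          rw [PySem.List.slice_natCast]
          simp only [List.drop_succ_cons, List.drop_zero]
          rw [show (1 + pre.length - 1 : Nat) = pre.length by omega]
          exact List.take_left
        rw [hslice']
        by_cases hpre : pre = []
        · subst hpre
          have h1 : (PySem.Chars.splitOn (PySem.Chars.join ['\n'] ([] : List (List Char))) ['\n']).foldl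
              pvScanStep (none, false) = ((none : Option (List Char)), false) := by decide
          simp only [h1]
          simp [pvFoldD, PySem.Dict.contains_empty]
        · have hnl : ∀ p ∈ pre, '\n' ∉ p := by
            have hall : ∀ p ∈ pvMySplit [] content.toList, '\n' ∉ p :=
              pv_mySplit_no_nl content.toList [] (by simp)
            rw [← pv_splitOn_eq, hl] at hall
            intro p hp'
            exact hall p (by simp [hp'])
          have hsp : PySem.Chars.splitOn (PySem.Chars.join ['\n'] pre) ['\n'] = pre := by
            rw [pv_splitOn_eq]; exact pv_mySplit_join pre hpre hnl
          have hfold : pre.foldl pvScanStep (none, false) =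
              ((pvFoldD pre PySem.Dict.empty).get? ("state".toList),
               (pvFoldD pre PySem.Dict.empty).contains ("created".toList)) := by
            have h2 := pv_inv pre PySem.Dict.empty
            simpa [PySem.Dict.get?_empty, PySem.Dict.contains_empty] using h2
          simp only [hsp, hfold]
          cases hg : (pvFoldD pre PySem.Dict.empty).get? ("state".toList) with
          | none =>
            have hc : (pvFoldD pre PySem.Dict.empty).contains ("state".toList) = false := by
              rw [PySem.Dict.contains_eq_isSome_get?, hg]; rfl
            simp at hc
            simp [hc]
          | some v =>
            have hc : (pvFoldD pre PySem.Dict.empty).contains ("state".toList) = true := by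
              rw [PySem.Dict.contains_eq_isSome_get?, hg]; rfl
            cases hcr : (pvFoldD pre PySem.Dict.empty).contains ("created".toList) with
            | false =>
              simp at hc hcr
              simp [hc]
            | true =>
              simp at hc hcr
              simp [hc]
    · simp at h0
      simp [h0]
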